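-- pv_equiv track=rewrite | github.com/JMiko/xbmc-tvalacarta | trunk/pelisalacarta/pelisalacarta/channels/documentalesatonline2.py | strip_ml_tags
-- ===== SOURCE A (Python) =====
-- def strip_ml_tags(in_text):
--     #source http://code.activestate.com/recipes/440481-strips-xmlhtml-tags-from-string/
--     s_list = list(in_text)
--     i = 0
--
--     while i < len(s_list):
--         if s_list[i] == '<':
--             while s_list[i] != '>':
--                 s_list.pop(i)
--             s_list.pop(i)
--         else:
--             i=i+1
--
--     join_char=''
--     return join_char.join(s_list)
-- ===== SOURCE B (Python) =====
-- def strip_ml_tags(in_text):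
--     out = []
--     in_tag = False
--     for ch in in_text:
--         if in_tag:
--             if ch == '>':
--                 in_tag = False
--         elif ch == '<':
--             in_tag = True
--         else:
--             out.append(ch)
--     return ''.join(out)
-- ===== Notes on version B (the rewrite author's own statement) =====
-- stated objective: faster
-- what changed: Replaces the quadratic pop-in-place while loops with a single linear pass tracking an in-tag flag and appending kept characters.
import Mathlib
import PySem

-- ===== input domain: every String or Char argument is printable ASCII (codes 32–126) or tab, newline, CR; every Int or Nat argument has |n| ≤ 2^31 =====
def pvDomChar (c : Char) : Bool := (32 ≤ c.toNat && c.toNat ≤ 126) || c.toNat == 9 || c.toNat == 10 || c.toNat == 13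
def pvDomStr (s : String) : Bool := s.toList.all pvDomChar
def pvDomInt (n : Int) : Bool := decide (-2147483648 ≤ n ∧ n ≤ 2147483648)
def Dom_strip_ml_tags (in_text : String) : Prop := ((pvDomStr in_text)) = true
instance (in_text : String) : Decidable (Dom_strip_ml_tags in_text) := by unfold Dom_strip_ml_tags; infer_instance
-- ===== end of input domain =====

-- B replaces A's quadratic pop-in-place loops by one linear in-tag-flag pass; equal on every input where A returns (Pre_ excludes the unmatched-'<' inputs on which A raises IndexError).

-- ===== PORT A =====
-- inner while: 'while s_list[i] != '>': s_list.pop(i)' then 'pop(i)', viewed on the suffix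
-- starting at i; on exhaustion Python raises IndexError (excluded by Pre_), here we return [].
def stripDropTag : List Char → List Char
  | [] => []
  | c :: rest => if c = '>' then rest else stripDropTag rest

theorem stripDropTag_length_le (l : List Char) : (stripDropTag l).length ≤ l.length := by
  induction l with
  | nil => simp [stripDropTag]
  | cons c rest ih =>
    simp only [stripDropTag]
    split
    · simp
    · exact Nat.le_trans ih (Nat.le_succ _)

-- outer while over i: characters before i are final, so recurse on the suffix at i
def stripLoopA : List Char → List Char
  | [] => []
  | c :: rest =>
    if c = '<' then stripLoopA (stripDropTag rest)  -- first inner pop removes the '<' itself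
    else c :: stripLoopA rest
termination_by l => l.length
decreasing_by
  · exact Nat.lt_succ_of_le (stripDropTag_length_le rest)
  · simp

-- list(in_text) = toList; ''.join = String.ofList (exact for any string)
def strip_ml_tags (in_text : String) : String := String.ofList (stripLoopA in_text.toList)

-- ===== PORT B =====
-- single pass, bool in_tag state
def stripLoopB : Bool → List Char → List Char
  | _, [] => []
  | true, c :: rest => if c = '>' then stripLoopB false rest else stripLoopB true rest
  | false, c :: rest => if c = '<' then stripLoopB true rest else c :: stripLoopB false rest

def strip_ml_tags_alt (in_text : String) : String := String.ofList (stripLoopB false in_text.toList)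

-- ===== PRECONDITION & SPEC =====
-- Pre_ excludes exactly the inputs on which Python A raises IndexError: a '<' with no '>' after it.
def Pre_strip_ml_tags (in_text : String) : Prop :=
  ∀ i < in_text.toList.length, in_text.toList.getD i ' ' = '<' →
    ∃ j < in_text.toList.length, i < j ∧ in_text.toList.getD j ' ' = '>'
instance (in_text : String) : Decidable (Pre_strip_ml_tags in_text) := by unfold Pre_strip_ml_tags; infer_instance
def pvWitness_strip_ml_tags : String := "a<b>c"

def Spec_strip_ml_tags (in_text : String) (out : String) : Prop := out = strip_ml_tags_alt in_text
instance (in_text : String) (out : String) : Decidable (Spec_strip_ml_tags in_text out) := by unfold Spec_strip_ml_tags; infer_instance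

-- ===== CLAIM (what is proved, stated in full; the proofs are below) =====
def Claim_equal_strip_ml_tags : Prop := ∀ (in_text : String), Dom_strip_ml_tags in_text → Pre_strip_ml_tags in_text → Spec_strip_ml_tags in_text (strip_ml_tags in_text)

-- ===== LEMMAS AND PROOFS =====

-- B's in-tag skipping equals A's eager popping of the tag body
theorem stripLoopB_true (l : List Char) : stripLoopB true l = stripLoopB false (stripDropTag l) := by
  induction l with
  | nil => simp [stripLoopB, stripDropTag]
  | cons c rest ih =>
    by_cases h : c = '>'
    · simp [stripLoopB, stripDropTag, h]
    · simp [stripLoopB, stripDropTag, h, ih]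

theorem stripLoopA_eq_B (l : List Char) : stripLoopA l = stripLoopB false l := by
  induction l using stripLoopA.induct with
  | case1 => simp [stripLoopA, stripLoopB]
  | case2 rest ih =>
    rw [stripLoopA, stripLoopB]
    simp [ih, stripLoopB_true]
  | case3 c rest h ih =>
    rw [stripLoopA, stripLoopB]
    simp [h, ih]

-- ===== VERDICT (by name: the statement is the Claim_ definition above) =====
theorem strip_ml_tags_spec : Claim_equal_strip_ml_tags := by
  intro s _ _
  unfold Spec_strip_ml_tags strip_ml_tags strip_ml_tags_alt
  rw [stripLoopA_eq_B]
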